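-- pv_equiv track=rewrite | github.com/sipherxyz/universal-ue-skills | skills/read-uasset-deep/scripts/parse_uasset.py | analyze_names
-- ===== SOURCE A (Python) =====
-- from typing import List, Optional, Dict, Any, BinaryIO
--
-- def analyze_names(names: list) -> Dict[str, Any]:
--     """Analyze name table for insights"""
--     analysis = {
--         'gameplay_tags': [],
--         'bt_nodes': [],
--         'abilities': [],
--         'montages': [],
--         'properties': [],
--         'enums': [],
--         'warnings': []
--     }
--
--     for name in names:
--         # Gameplay tags
--         if name.startswith('Sipher.') or '.State.' in name or '.Ability.' in name:
--             analysis['gameplay_tags'].append(name)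
--         # BT node types
--         elif name.startswith('BT') and ('Composite' in name or 'Decorator' in name or 'Task' in name or 'Service' in name):
--             analysis['bt_nodes'].append(name)
--         # Abilities
--         elif name.startswith('GA_') or name.endswith('_C') and 'Ability' in name:
--             analysis['abilities'].append(name)
--         # Montages
--         elif name.startswith('AMT_') or 'Montage' in name:
--             analysis['montages'].append(name)
--         # Enums
--         elif name.startswith('E') and '::' in name:
--             analysis['enums'].append(name)
--         # Warnings - TEMP or Test prefixes
--         if 'TEMP_' in name or 'BP_Test' in name:
--             analysis['warnings'].append(f"WIP asset: {name}")
--         # Typo detection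
--         if 'Bawuchang' in name:  # Common typo
--             analysis['warnings'].append(f"Possible typo 'Bawuchang' -> 'Baiwuchang': {name}")
--
--     return analysis
-- ===== SOURCE B (Python) =====
-- def analyze_names(names: list):
--     """Analyze name table for insights (staged passes: one comprehension per key)."""
--     def is_tag(n):
--         return n.startswith('Sipher.') or '.State.' in n or '.Ability.' in n
--
--     def is_bt(n):
--         return n.startswith('BT') and ('Composite' in n or 'Decorator' in n
--                                        or 'Task' in n or 'Service' in n)
--
--     def is_ability(n):
--         return n.startswith('GA_') or (n.endswith('_C') and 'Ability' in n)
--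
--     def is_montage(n):
--         return n.startswith('AMT_') or 'Montage' in n
--
--     def is_enum(n):
--         return n.startswith('E') and '::' in n
--
--     def warn_msgs(n):
--         msgs = []
--         if 'TEMP_' in n or 'BP_Test' in n:
--             msgs.append(f"WIP asset: {n}")
--         if 'Bawuchang' in n:
--             msgs.append(f"Possible typo 'Bawuchang' -> 'Baiwuchang': {n}")
--         return msgs
--
--     return {
--         'gameplay_tags': [n for n in names if is_tag(n)],
--         'bt_nodes': [n for n in names if not is_tag(n) and is_bt(n)],
--         'abilities': [n for n in names
--                       if not is_tag(n) and not is_bt(n) and is_ability(n)],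
--         'montages': [n for n in names
--                      if not is_tag(n) and not is_bt(n) and not is_ability(n)
--                      and is_montage(n)],
--         'properties': [],
--         'enums': [n for n in names
--                   if not is_tag(n) and not is_bt(n) and not is_ability(n)
--                   and not is_montage(n) and is_enum(n)],
--         'warnings': [m for n in names for m in warn_msgs(n)],
--     }
-- ===== Notes on version B (the rewrite author's own statement) =====
-- stated objective: idiomatic
-- what changed: Replaces A's single loop that mutates a shared dict (elif chain plus inline warning appends) by seven independent staged passes: one list comprehension per category filtering on its predicate conjoined with the negation of all earlier predicates, and one flat comprehension producing all warning messages.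
import Mathlib
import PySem

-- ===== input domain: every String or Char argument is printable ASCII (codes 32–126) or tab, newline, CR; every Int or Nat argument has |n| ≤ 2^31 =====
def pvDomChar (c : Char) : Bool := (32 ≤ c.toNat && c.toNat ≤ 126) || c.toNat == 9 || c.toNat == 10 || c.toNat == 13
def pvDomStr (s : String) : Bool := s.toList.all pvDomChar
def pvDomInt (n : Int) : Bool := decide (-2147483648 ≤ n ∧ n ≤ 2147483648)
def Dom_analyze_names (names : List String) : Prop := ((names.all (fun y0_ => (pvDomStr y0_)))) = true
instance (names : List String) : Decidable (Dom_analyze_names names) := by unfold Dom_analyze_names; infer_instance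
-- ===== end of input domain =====

-- B replaces A's single loop mutating a dict by seven independent staged passes (one filter per
-- category, excluding earlier categories, and one flatMap for warnings): same result, an
-- idiomatic comprehension-per-key decomposition.


-- ===== PORT A =====
-- one iteration of A's for-loop: elif chain of categories, then the two independent warning checks
def analyzeStepA (d : PySem.Dict String (List String)) (name : String) :
    PySem.Dict String (List String) :=
  let d1 :=
    if PySem.Str.startswith name "Sipher." || PySem.Str.isIn ".State." name
        || PySem.Str.isIn ".Ability." name then
      d.modify "gameplay_tags" [] (· ++ [name])
    else if PySem.Str.startswith name "BT" &&
        (PySem.Str.isIn "Composite" name || PySem.Str.isIn "Decorator" name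
          || PySem.Str.isIn "Task" name || PySem.Str.isIn "Service" name) then
      d.modify "bt_nodes" [] (· ++ [name])
    else if PySem.Str.startswith name "GA_" ||
        (PySem.Str.endswith name "_C" && PySem.Str.isIn "Ability" name) then
      d.modify "abilities" [] (· ++ [name])
    else if PySem.Str.startswith name "AMT_" || PySem.Str.isIn "Montage" name then
      d.modify "montages" [] (· ++ [name])
    else if PySem.Str.startswith name "E" && PySem.Str.isIn "::" name then
      d.modify "enums" [] (· ++ [name])
    else d
  let d2 :=
    if PySem.Str.isIn "TEMP_" name || PySem.Str.isIn "BP_Test" name then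
      d1.modify "warnings" [] (· ++ ["WIP asset: " ++ name])
    else d1
  if PySem.Str.isIn "Bawuchang" name then
    d2.modify "warnings" [] (· ++ ["Possible typo 'Bawuchang' -> 'Baiwuchang': " ++ name])
  else d2

def analyze_names (names : List String) : List (String × List String) :=
  (names.foldl analyzeStepA
    (PySem.Dict.ofList
      [("gameplay_tags", []), ("bt_nodes", []), ("abilities", []), ("montages", []),
       ("properties", []), ("enums", []), ("warnings", [])])).items

-- ===== PORT B =====
def pvIsTag (n : String) : Bool :=
  PySem.Str.startswith n "Sipher." || PySem.Str.isIn ".State." n || PySem.Str.isIn ".Ability." n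
def pvIsBT (n : String) : Bool :=
  PySem.Str.startswith n "BT" &&
    (PySem.Str.isIn "Composite" n || PySem.Str.isIn "Decorator" n
      || PySem.Str.isIn "Task" n || PySem.Str.isIn "Service" n)
def pvIsAbility (n : String) : Bool :=
  PySem.Str.startswith n "GA_" || (PySem.Str.endswith n "_C" && PySem.Str.isIn "Ability" n)
def pvIsMontage (n : String) : Bool :=
  PySem.Str.startswith n "AMT_" || PySem.Str.isIn "Montage" n
def pvIsEnum (n : String) : Bool :=
  PySem.Str.startswith n "E" && PySem.Str.isIn "::" n
def pvWarnMsgs (n : String) : List String :=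
  (if PySem.Str.isIn "TEMP_" n || PySem.Str.isIn "BP_Test" n
     then ["WIP asset: " ++ n] else []) ++
  (if PySem.Str.isIn "Bawuchang" n
     then ["Possible typo 'Bawuchang' -> 'Baiwuchang': " ++ n] else [])

def analyze_names_alt (names : List String) : List (String × List String) :=
  [("gameplay_tags", names.filter pvIsTag),
   ("bt_nodes", names.filter (fun n => !pvIsTag n && pvIsBT n)),
   ("abilities", names.filter (fun n => !pvIsTag n && !pvIsBT n && pvIsAbility n)),
   ("montages", names.filter (fun n => !pvIsTag n && !pvIsBT n && !pvIsAbility n && pvIsMontage n)),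
   ("properties", []),
   ("enums", names.filter
      (fun n => !pvIsTag n && !pvIsBT n && !pvIsAbility n && !pvIsMontage n && pvIsEnum n)),
   ("warnings", names.flatMap pvWarnMsgs)]

-- ===== PRECONDITION & SPEC =====
def Spec_analyze_names (names : List String) (out : List (String × List String)) : Prop := out = analyze_names_alt names
instance (names : List String) (out : List (String × List String)) : Decidable (Spec_analyze_names names out) := by unfold Spec_analyze_names; infer_instance

-- ===== CLAIM (what is proved, stated in full; the proofs are below) =====
def Claim_equal_analyze_names : Prop := ∀ (names : List String), Dom_analyze_names names → Spec_analyze_names names (analyze_names names)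

-- ===== LEMMAS AND PROOFS =====
-- the exact dict shape A's loop maintains
def pvMkD (g b ab m e w : List String) : PySem.Dict String (List String) :=
  PySem.Dict.ofList
    [("gameplay_tags", g), ("bt_nodes", b), ("abilities", ab), ("montages", m),
     ("properties", []), ("enums", e), ("warnings", w)]

theorem pv_modG (g b ab m e w : List String) (n : String) :
    (pvMkD g b ab m e w).modify "gameplay_tags" [] (· ++ [n]) = pvMkD (g ++ [n]) b ab m e w := rfl
theorem pv_modB (g b ab m e w : List String) (n : String) :
    (pvMkD g b ab m e w).modify "bt_nodes" [] (· ++ [n]) = pvMkD g (b ++ [n]) ab m e w := rfl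
theorem pv_modAb (g b ab m e w : List String) (n : String) :
    (pvMkD g b ab m e w).modify "abilities" [] (· ++ [n]) = pvMkD g b (ab ++ [n]) m e w := rfl
theorem pv_modM (g b ab m e w : List String) (n : String) :
    (pvMkD g b ab m e w).modify "montages" [] (· ++ [n]) = pvMkD g b ab (m ++ [n]) e w := rfl
theorem pv_modE (g b ab m e w : List String) (n : String) :
    (pvMkD g b ab m e w).modify "enums" [] (· ++ [n]) = pvMkD g b ab m (e ++ [n]) w := rfl
theorem pv_modW (g b ab m e w : List String) (x : String) :
    (pvMkD g b ab m e w).modify "warnings" [] (· ++ [x]) = pvMkD g b ab m e (w ++ [x]) := rfl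

-- proof-only decomposition of analyzeStepA (definitional)
def pvCatPart (d : PySem.Dict String (List String)) (n : String) :
    PySem.Dict String (List String) :=
  if pvIsTag n then d.modify "gameplay_tags" [] (· ++ [n])
  else if pvIsBT n then d.modify "bt_nodes" [] (· ++ [n])
  else if pvIsAbility n then d.modify "abilities" [] (· ++ [n])
  else if pvIsMontage n then d.modify "montages" [] (· ++ [n])
  else if pvIsEnum n then d.modify "enums" [] (· ++ [n])
  else d

def pvWarnPart (d : PySem.Dict String (List String)) (n : String) :
    PySem.Dict String (List String) :=
  let d2 :=
    if PySem.Str.isIn "TEMP_" n || PySem.Str.isIn "BP_Test" n then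
      d.modify "warnings" [] (· ++ ["WIP asset: " ++ n])
    else d
  if PySem.Str.isIn "Bawuchang" n then
    d2.modify "warnings" [] (· ++ ["Possible typo 'Bawuchang' -> 'Baiwuchang': " ++ n])
  else d2

theorem stepA_decomp (d : PySem.Dict String (List String)) (n : String) :
    analyzeStepA d n = pvWarnPart (pvCatPart d n) n := rfl

theorem pv_cat (g b ab m e w : List String) (n : String) :
    pvCatPart (pvMkD g b ab m e w) n =
      pvMkD (g ++ if pvIsTag n then [n] else [])
            (b ++ if !pvIsTag n && pvIsBT n then [n] else [])
            (ab ++ if !pvIsTag n && !pvIsBT n && pvIsAbility n then [n] else [])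
            (m ++ if !pvIsTag n && !pvIsBT n && !pvIsAbility n && pvIsMontage n then [n] else [])
            (e ++ if !pvIsTag n && !pvIsBT n && !pvIsAbility n && !pvIsMontage n && pvIsEnum n
                  then [n] else [])
            w := by
  unfold pvCatPart
  by_cases hg : pvIsTag n = true
  · rw [if_pos hg, pv_modG, if_pos hg,
      if_neg (fun hc => by rw [hg] at hc; simp at hc),
      if_neg (fun hc => by rw [hg] at hc; simp at hc),
      if_neg (fun hc => by rw [hg] at hc; simp at hc),
      if_neg (fun hc => by rw [hg] at hc; simp at hc)]
    simp only [List.append_nil]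
  · rw [Bool.not_eq_true] at hg
    by_cases hb : pvIsBT n = true
    · rw [if_neg (fun hc => by rw [hg] at hc; simp at hc), if_pos hb, pv_modB,
        if_neg (fun hc => by rw [hg] at hc; simp at hc),
        if_pos (show (!pvIsTag n && pvIsBT n) = true by rw [hg, hb]; rfl),
        if_neg (fun hc => by rw [hb] at hc; simp at hc),
        if_neg (fun hc => by rw [hb] at hc; simp at hc),
        if_neg (fun hc => by rw [hb] at hc; simp at hc)]
      simp only [List.append_nil]
    · rw [Bool.not_eq_true] at hb
      by_cases ha : pvIsAbility n = true
      · rw [if_neg (fun hc => by rw [hg] at hc; simp at hc),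
          if_neg (fun hc => by rw [hb] at hc; simp at hc), if_pos ha, pv_modAb,
          if_neg (fun hc => by rw [hg] at hc; simp at hc),
          if_neg (fun hc => by rw [hb] at hc; simp at hc),
          if_pos (show (!pvIsTag n && !pvIsBT n && pvIsAbility n) = true by rw [hg, hb, ha]; rfl),
          if_neg (fun hc => by rw [ha] at hc; simp at hc),
          if_neg (fun hc => by rw [ha] at hc; simp at hc)]
        simp only [List.append_nil]
      · rw [Bool.not_eq_true] at ha
        by_cases hm : pvIsMontage n = true
        · rw [if_neg (fun hc => by rw [hg] at hc; simp at hc),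
            if_neg (fun hc => by rw [hb] at hc; simp at hc),
            if_neg (fun hc => by rw [ha] at hc; simp at hc), if_pos hm, pv_modM,
            if_neg (fun hc => by rw [hg] at hc; simp at hc),
            if_neg (fun hc => by rw [hb] at hc; simp at hc),
            if_neg (fun hc => by rw [ha] at hc; simp at hc),
            if_pos (show (!pvIsTag n && !pvIsBT n && !pvIsAbility n && pvIsMontage n) = true by
              rw [hg, hb, ha, hm]; rfl),
            if_neg (fun hc => by rw [hm] at hc; simp at hc)]
          simp only [List.append_nil]
        · rw [Bool.not_eq_true] at hm
          by_cases he : pvIsEnum n = true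
          · rw [if_neg (fun hc => by rw [hg] at hc; simp at hc),
              if_neg (fun hc => by rw [hb] at hc; simp at hc),
              if_neg (fun hc => by rw [ha] at hc; simp at hc),
              if_neg (fun hc => by rw [hm] at hc; simp at hc), if_pos he, pv_modE,
              if_neg (fun hc => by rw [hg] at hc; simp at hc),
              if_neg (fun hc => by rw [hb] at hc; simp at hc),
              if_neg (fun hc => by rw [ha] at hc; simp at hc),
              if_neg (fun hc => by rw [hm] at hc; simp at hc),
              if_pos (show (!pvIsTag n && !pvIsBT n && !pvIsAbility n && !pvIsMontage n
                  && pvIsEnum n) = true by rw [hg, hb, ha, hm, he]; rfl)]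
            simp only [List.append_nil]
          · rw [Bool.not_eq_true] at he
            rw [if_neg (fun hc => by rw [hg] at hc; simp at hc),
              if_neg (fun hc => by rw [hb] at hc; simp at hc),
              if_neg (fun hc => by rw [ha] at hc; simp at hc),
              if_neg (fun hc => by rw [hm] at hc; simp at hc),
              if_neg (fun hc => by rw [he] at hc; simp at hc),
              if_neg (fun hc => by rw [hg] at hc; simp at hc),
              if_neg (fun hc => by rw [hb] at hc; simp at hc),
              if_neg (fun hc => by rw [ha] at hc; simp at hc),
              if_neg (fun hc => by rw [hm] at hc; simp at hc),
              if_neg (fun hc => by rw [he] at hc; simp at hc)]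
            simp only [List.append_nil]

theorem pv_warnStep (c : Prop) [Decidable c] (g b ab m e w : List String) (x : String) :
    (if c then (pvMkD g b ab m e w).modify "warnings" [] (· ++ [x]) else pvMkD g b ab m e w) =
      pvMkD g b ab m e (w ++ if c then [x] else []) := by
  split_ifs
  · rw [pv_modW]
  · rw [List.append_nil]

theorem pv_warn (g b ab m e w : List String) (n : String) :
    pvWarnPart (pvMkD g b ab m e w) n = pvMkD g b ab m e (w ++ pvWarnMsgs n) := by
  unfold pvWarnPart pvWarnMsgs
  rw [pv_warnStep, pv_warnStep, List.append_assoc]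

theorem pv_step (g b ab m e w : List String) (n : String) :
    analyzeStepA (pvMkD g b ab m e w) n =
      pvMkD (g ++ if pvIsTag n then [n] else [])
            (b ++ if !pvIsTag n && pvIsBT n then [n] else [])
            (ab ++ if !pvIsTag n && !pvIsBT n && pvIsAbility n then [n] else [])
            (m ++ if !pvIsTag n && !pvIsBT n && !pvIsAbility n && pvIsMontage n then [n] else [])
            (e ++ if !pvIsTag n && !pvIsBT n && !pvIsAbility n && !pvIsMontage n && pvIsEnum n
                  then [n] else [])
            (w ++ pvWarnMsgs n) := by
  rw [stepA_decomp, pv_cat, pv_warn]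

-- (if c then [n] else []) ++ l  matches filter_cons's shape
theorem pv_ite_append {α : Type} (c : Prop) [Decidable c] (l : List α) (n : α) :
    (if c then [n] else []) ++ l = if c then n :: l else l := by
  split_ifs <;> simp

theorem pv_fold (names : List String) (g b ab m e w : List String) :
    names.foldl analyzeStepA (pvMkD g b ab m e w) =
      pvMkD (g ++ names.filter pvIsTag)
            (b ++ names.filter (fun n => !pvIsTag n && pvIsBT n))
            (ab ++ names.filter (fun n => !pvIsTag n && !pvIsBT n && pvIsAbility n))
            (m ++ names.filter
               (fun n => !pvIsTag n && !pvIsBT n && !pvIsAbility n && pvIsMontage n))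
            (e ++ names.filter
               (fun n => !pvIsTag n && !pvIsBT n && !pvIsAbility n && !pvIsMontage n && pvIsEnum n))
            (w ++ names.flatMap pvWarnMsgs) := by
  induction names generalizing g b ab m e w with
  | nil => simp only [List.foldl_nil, List.filter_nil, List.flatMap_nil, List.append_nil]
  | cons n ns ih =>
      rw [List.foldl_cons, pv_step, ih]
      simp only [List.filter_cons, List.flatMap_cons, List.append_assoc, pv_ite_append]

theorem pv_items (g b ab m e w : List String) :
    (pvMkD g b ab m e w).items =
      [("gameplay_tags", g), ("bt_nodes", b), ("abilities", ab), ("montages", m),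
       ("properties", []), ("enums", e), ("warnings", w)] := rfl

-- ===== VERDICT (by name: the statement is the Claim_ definition above) =====
theorem analyze_names_spec : Claim_equal_analyze_names := by
  intro names _
  show analyze_names names = analyze_names_alt names
  unfold analyze_names
  have h0 : PySem.Dict.ofList
      ([("gameplay_tags", []), ("bt_nodes", []), ("abilities", []), ("montages", []),
        ("properties", []), ("enums", []), ("warnings", [])] :
        List (String × List String)) = pvMkD [] [] [] [] [] [] := rfl
  rw [h0, pv_fold, pv_items]
  simp only [List.nil_append]
  rfl
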